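-- pv_equiv track=rewrite | github.com/niranjan144/leetcode-problems | 2315-count-asterisks/2315-count-asterisks.py | countAsterisks
-- ===== SOURCE A (Python) =====
-- def countAsterisks(s: str) -> int:
--     stk=""
--     count=0
--     co=0
--     for i in s:
--         if i=="|":
--             count+=1
--         if count%2==0:
--             stk+=i
--     for i in stk:
--         if i=='*':
--             co+=1
--     return co
-- ===== SOURCE B (Python) =====
-- def countAsterisks(s: str) -> int:
--     return sum(seg.count('*') for seg in s.split('|')[::2])
-- ===== Notes on version B (the rewrite author's own statement) =====
-- stated objective: idiomatic
-- what changed: Replaces A's two-pass bar-counter (build a filtered copy of the string under a parity counter, then scan it for asterisks) with a one-liner that splits the string on the bar character and sums asterisk counts over the even-indexed segments, which are exactly the regions outside bars.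
import Mathlib
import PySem

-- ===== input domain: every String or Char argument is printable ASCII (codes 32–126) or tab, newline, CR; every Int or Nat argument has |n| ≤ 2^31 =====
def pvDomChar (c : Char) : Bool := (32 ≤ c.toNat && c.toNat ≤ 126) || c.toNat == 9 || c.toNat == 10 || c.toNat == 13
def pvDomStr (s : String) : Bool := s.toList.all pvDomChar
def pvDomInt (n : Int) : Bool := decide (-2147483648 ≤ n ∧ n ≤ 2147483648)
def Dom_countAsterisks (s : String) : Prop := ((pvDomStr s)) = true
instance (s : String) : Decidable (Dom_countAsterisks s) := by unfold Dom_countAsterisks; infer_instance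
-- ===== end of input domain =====

-- Header: B replaces A's two-pass parity-counter + filtered-string build by split('|') and
-- counting '*' in the even-indexed segments (idiomatic; C-level str methods replace the per-char Python loop).


-- ===== PORT A =====
-- pass 1: count bars, keep chars seen while the bar count is even; pass 2: count '*' in the kept string
def countAsterisks (s : String) : Int :=
  let st := s.toList.foldl (fun (p : Int × List Char) i =>
      let count := if i == '|' then p.1 + 1 else p.1
      let stk := if PySem.Int.mod count 2 = 0 then p.2 ++ [i] else p.2
      (count, stk)) ((0 : Int), ([] : List Char))
  st.2.foldl (fun co i => if i == '*' then co + 1 else co) (0 : Int)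

-- ===== PORT B =====
-- sum(seg.count('*') for seg in s.split('|')[::2]); split('|') never returns None ('|' ≠ '')
def countAsterisks_alt (s : String) : Int :=
  let segs := (PySem.Str.split? s "|").getD []
  let evens := (PySem.List.slice? segs none none 2).getD []
  (evens.map (fun seg => (PySem.Str.count seg "*" : Int))).sum

-- ===== PRECONDITION & SPEC =====
def Spec_countAsterisks (s : String) (out : Int) : Prop := out = countAsterisks_alt s
instance (s : String) (out : Int) : Decidable (Spec_countAsterisks s out) := by unfold Spec_countAsterisks; infer_instance

-- ===== CLAIM (what is proved, stated in full; the proofs are below) =====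
def Claim_equal_countAsterisks : Prop := ∀ (s : String), Dom_countAsterisks s → Spec_countAsterisks s (countAsterisks s)

-- ===== LEMMAS AND PROOFS =====

-- the common specification: '*'-count outside bars, flag = "currently outside"
def pvSpec : List Char → Bool → Nat
  | [], _ => 0
  | c :: cs, flag =>
    if c = '|' then pvSpec cs (!flag)
    else (if flag && (c == '*') then 1 else 0) + pvSpec cs flag

-- structural recursion equal to Python's split('|')
def pvSplit : List Char → List (List Char)
  | [] => [[]]
  | c :: cs => if c = '|' then [] :: pvSplit cs else (pvSplit cs).modifyHead (c :: ·)

mutual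
def pvEvens {α : Type} : List α → List α
  | [] => []
  | x :: xs => x :: pvOdds xs
def pvOdds {α : Type} : List α → List α
  | [] => []
  | _ :: xs => pvEvens xs
end

theorem pvSplit_ne_nil (cs : List Char) : pvSplit cs ≠ [] := by
  induction cs with
  | nil => simp [pvSplit]
  | cons c cs ih =>
    simp only [pvSplit]
    split
    · simp
    · cases h : pvSplit cs with
      | nil => exact absurd h ih
      | cons m M => simp [List.modifyHead]

theorem count_go_single (c : Char) :
    ∀ (fuel : Nat) (l : List Char) (acc : Nat), l.length ≤ fuel →
      PySem.Chars.count.go [c] fuel l acc = acc + l.count c := by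
  intro fuel
  induction fuel with
  | zero => intro l acc h; cases l with
    | nil => simp [PySem.Chars.count.go]
    | cons a t => simp at h
  | succ fuel ih =>
    intro l acc h
    cases l with
    | nil => simp [PySem.Chars.count.go]
    | cons a t =>
      simp only [PySem.Chars.count.go]
      by_cases hc : c = a
      · subst hc
        simp only [List.isPrefixOf, BEq.rfl, Bool.true_and, if_pos]
        rw [ih _ _ (by simpa using Nat.le_of_succ_le_succ h)]
        simp
        omega
      · have : ([c].isPrefixOf (a :: t)) = false := by
          simp [List.isPrefixOf, hc]
        rw [this]
        simp only [Bool.false_eq_true, if_neg, not_false_iff]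
        rw [ih _ _ (by simpa using Nat.le_of_succ_le_succ h)]
        simp [List.count_cons]
        intro h'; exact absurd h'.symm hc

theorem chars_count_single (s : List Char) (c : Char) :
    PySem.Chars.count s [c] = s.count c := by
  simp [PySem.Chars.count, List.isEmpty]
  simpa using count_go_single c s.length s 0 (Nat.le_refl _)

theorem split_go (fuel : Nat) :
    ∀ (l cur : List Char) (acc : List (List Char)), l.length ≤ fuel →
      PySem.Chars.splitOn.go ['|'] fuel l cur acc
        = acc.reverse ++ (pvSplit l).modifyHead (cur.reverse ++ ·) := by
  induction fuel with
  | zero =>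
    intro l cur acc h
    cases l with
    | nil => simp [PySem.Chars.splitOn.go, pvSplit, List.modifyHead]
    | cons a t => simp at h
  | succ fuel ih =>
    intro l cur acc h
    cases l with
    | nil => simp [PySem.Chars.splitOn.go, pvSplit, List.modifyHead]
    | cons a t =>
      simp only [PySem.Chars.splitOn.go]
      by_cases hc : a = '|'
      · subst hc
        simp only [List.isPrefixOf, BEq.rfl, Bool.true_and, if_pos]
        rw [ih _ _ _ (by simpa using Nat.le_of_succ_le_succ h)]
        simp only [pvSplit, List.reverse_cons, List.reverse_nil, List.nil_append,
          List.modifyHead]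
        cases h' : pvSplit t <;> simp [h']
      · have hp : (['|'].isPrefixOf (a :: t)) = false := by
          simp [List.isPrefixOf]
          exact fun h' => absurd h'.symm hc
        rw [hp]
        simp only [Bool.false_eq_true, if_neg, not_false_iff]
        rw [ih _ _ _ (by simpa using Nat.le_of_succ_le_succ h)]
        obtain ⟨m, M, hm⟩ : ∃ m M, pvSplit t = m :: M := by
          cases h' : pvSplit t with
          | nil => exact absurd h' (pvSplit_ne_nil t)
          | cons m M => exact ⟨m, M, rfl⟩
        simp [pvSplit, hc, hm, List.modifyHead]

theorem splitOn_eq_pvSplit (cs : List Char) :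
    PySem.Chars.splitOn cs ['|'] = pvSplit cs := by
  have h := split_go (cs.length + 1) cs [] [] (by omega)
  have hid : (pvSplit cs).modifyHead (fun x => x) = pvSplit cs := by cases pvSplit cs <;> simp
  simpa [PySem.Chars.splitOn, hid] using h

theorem pvEvens_map {α β : Type} (f : α → β) :
    ∀ (l : List α), pvEvens (l.map f) = (pvEvens l).map f ∧ pvOdds (l.map f) = (pvOdds l).map f := by
  intro l
  induction l with
  | nil => simp [pvEvens, pvOdds]
  | cons x xs ih => simp [pvEvens, pvOdds, ih.1, ih.2]

theorem slice2_main {α : Type} : ∀ (xs : List α),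
    List.filterMap (fun (k : Nat) => xs[(2 * (k:Int)).toNat]?)
      (List.range (if 0 < xs.length then (((xs.length : Int) + 2 - 1) / 2).toNat else 0))
      = pvEvens xs
  | [] => by simp [pvEvens]
  | [x] => by simp [pvEvens, pvOdds, List.range_succ]
  | x :: y :: t => by
    have hcnt : (if 0 < (x :: y :: t).length then ((((x :: y :: t).length : Int) + 2 - 1) / 2).toNat else 0)
        = (if 0 < t.length then (((t.length : Int) + 2 - 1) / 2).toNat else 0) + 1 := by
      simp only [List.length_cons]
      by_cases h : 0 < t.length <;> simp [h] <;> omega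
    rw [hcnt, List.range_succ_eq_map, List.filterMap_cons]
    have h0 : ((x :: y :: t)[(2 * ((0:Nat):Int)).toNat]?) = some x := by norm_num
    rw [h0, List.filterMap_map]
    have hfun : ∀ k ∈ List.range (if 0 < t.length then (((t.length : Int) + 2 - 1) / 2).toNat else 0),
        ((fun (k : Nat) => (x :: y :: t)[(2 * (k:Int)).toNat]?) ∘ Nat.succ) k
          = (fun (k : Nat) => t[(2 * (k:Int)).toNat]?) k := by
      intro k _
      have h2 : (2 * ((k:Int) + 1)).toNat = 2 * k + 2 := by omega
      have h3 : (2 * (k:Int)).toNat = 2 * k := by omega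
      simp [Function.comp, h2, h3]
    rw [List.filterMap_congr hfun, slice2_main t]
    simp [pvEvens, pvOdds]

theorem slice2_eq_pvEvens {α : Type} (xs : List α) :
    PySem.List.slice? xs none none 2 = some (pvEvens xs) := by
  simp only [PySem.List.slice?, PySem.List.sliceIndices]
  norm_num
  exact slice2_main xs

-- sum of '*'-counts over even/odd segments of the split = parity-filtered count
theorem sum_evens_pvSplit (cs : List Char) :
    ((pvEvens (pvSplit cs)).map (fun seg => seg.count '*')).sum = pvSpec cs true
    ∧ ((pvOdds (pvSplit cs)).map (fun seg => seg.count '*')).sum = pvSpec cs false := by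
  induction cs with
  | nil => simp [pvSplit, pvEvens, pvOdds, pvSpec]
  | cons c cs ih =>
    by_cases hc : c = '|'
    · subst hc
      simp [pvSplit, pvEvens, pvOdds, pvSpec, ih.1, ih.2]
    · obtain ⟨m, M, hm⟩ : ∃ m M, pvSplit cs = m :: M := by
        cases h' : pvSplit cs with
        | nil => exact absurd h' (pvSplit_ne_nil cs)
        | cons m M => exact ⟨m, M, rfl⟩
      have h1 := ih.1; have h2 := ih.2
      rw [hm] at h1 h2
      simp only [pvEvens, pvOdds, List.map_cons, List.sum_cons] at h1 h2
      constructor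
      · simp only [pvSplit, if_neg hc, hm, List.modifyHead, pvEvens, List.map_cons,
          List.sum_cons, pvSpec, List.count_cons]
        by_cases hs : c = '*' <;> simp [hs] <;> omega
      · simp only [pvSplit, if_neg hc, hm, List.modifyHead, pvOdds, pvSpec]
        simpa using h2

-- A's loop invariant
theorem a_inv (cs : List Char) :
    ∀ (n : Int) (stk : List Char), 0 ≤ n →
      ((cs.foldl (fun (p : Int × List Char) i =>
        let count := if i == '|' then p.1 + 1 else p.1
        let stk := if PySem.Int.mod count 2 = 0 then p.2 ++ [i] else p.2
        (count, stk)) (n, stk)).2.count '*' : Nat)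
      = stk.count '*' + pvSpec cs (decide (PySem.Int.mod n 2 = 0)) := by
  induction cs with
  | nil => intro n stk _; simp [pvSpec]
  | cons c cs ih =>
    intro n stk hn
    rw [List.foldl_cons]
    by_cases hc : c = '|'
    · subst hc
      have hstep : (let count := if ('|' == '|') = true then (n, stk).1 + 1 else (n, stk).1
          let stk2 := if PySem.Int.mod count 2 = 0 then (n, stk).2 ++ ['|'] else (n, stk).2
          ((count : Int), (stk2 : List Char)))
          = (n + 1, if PySem.Int.mod (n + 1) 2 = 0 then stk ++ ['|'] else stk) := by simp
      rw [hstep, ih (n + 1) _ (by omega)]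
      have hflip : (decide (PySem.Int.mod (n + 1) 2 = 0)) = !(decide (PySem.Int.mod n 2 = 0)) := by
        rw [PySem.Int.mod_eq_emod_of_pos (a := n) (by omega),
            PySem.Int.mod_eq_emod_of_pos (a := n + 1) (by omega)]
        by_cases h2 : n % 2 = 0
        · have h3 : (n + 1) % 2 = 1 := by omega
          simp [h2, h3]
        · have h3 : (n + 1) % 2 = 0 := by omega
          simp [h2, h3]
      rw [hflip]
      simp only [pvSpec, reduceIte]
      split <;> simp [List.count_append]
    · have hstep : (let count := if (c == '|') = true then (n, stk).1 + 1 else (n, stk).1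
          let stk2 := if PySem.Int.mod count 2 = 0 then (n, stk).2 ++ [c] else (n, stk).2
          ((count : Int), (stk2 : List Char)))
          = (n, if PySem.Int.mod n 2 = 0 then stk ++ [c] else stk) := by simp [hc]
      rw [hstep, ih n _ hn]
      by_cases hm : PySem.Int.mod n 2 = 0
      · simp only [hm, decide_true, pvSpec, if_neg hc]
        by_cases hs : c = '*'
        · simp [hs, List.count_append]
          omega
        · simp [hs, List.count_append]
      · have hm' : ¬ (2 ∣ n) := by
          rw [← PySem.Int.mod_eq_zero_iff_dvd]; exact hm
        simp [hm', pvSpec, hc]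

theorem cast_sum_counts (L : List (List Char)) :
    ((L.map (fun seg => (seg.count '*' : Int))).sum) = ((L.map (fun seg => seg.count '*')).sum : Nat) := by
  induction L with
  | nil => simp
  | cons x xs ih => simp [ih]

-- ===== VERDICT (by name: the statement is the Claim_ definition above) =====
theorem countAsterisks_spec : Claim_equal_countAsterisks := by
  intro s _
  unfold Spec_countAsterisks countAsterisks countAsterisks_alt
  simp only []
  rw [PySem.List.foldl_beq_add_one]
  have hsplit : PySem.Str.split? s "|" = some ((pvSplit s.toList).map String.ofList) := by
    rw [PySem.Str.split?]
    simp [PySem.Chars.split?, List.isEmpty]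
    rw [splitOn_eq_pvSplit]
  rw [hsplit]
  simp only [Option.getD_some]
  rw [slice2_eq_pvEvens]
  simp only [Option.getD_some]
  rw [(pvEvens_map String.ofList (pvSplit s.toList)).1]
  have hcount : ∀ m : List Char, PySem.Str.count (String.ofList m) "*" = m.count '*' := by
    intro m
    rw [PySem.Str.count]
    have h1 : (String.ofList m).toList = m := by simp
    have h2 : ("*" : String).toList = ['*'] := rfl
    rw [h1, h2, chars_count_single]
  have := a_inv s.toList 0 []
  simp only [List.count_nil, Nat.zero_add] at this
  rw [this (by omega)]
  have hmod0 : PySem.Int.mod 0 2 = 0 := by decide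
  simp only [hmod0, decide_true, List.map_map, Function.comp_def, hcount]
  rw [cast_sum_counts, (sum_evens_pvSplit s.toList).1]
  simp
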